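-- pv_equiv track=rewrite | github.com/Aditya-Somasi/Vision-Inspection-System | src/orchestration/session_aggregation.py | determine_aggregate_verdict
-- ===== SOURCE A (Python) =====
-- from typing import Dict, Any, List
--
-- def determine_aggregate_verdict(verdicts: List[str], total_defects: int) -> str:
--     """
--     Determine aggregate verdict from per-image verdicts.
--
--     Conservative approach:
--     - If any UNSAFE → UNSAFE
--     - If any REQUIRES_HUMAN_REVIEW → REQUIRES_HUMAN_REVIEW
--     - If all SAFE → SAFE
--     - If mixed with defects → REQUIRES_HUMAN_REVIEW
--     """
--     if not verdicts:
--         return "UNKNOWN"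
--
--     # If any image is UNSAFE, session is UNSAFE (conservative)
--     if any(v == "UNSAFE" for v in verdicts):
--         return "UNSAFE"
--
--     # If any image requires human review, session requires review
--     if any(v == "REQUIRES_HUMAN_REVIEW" for v in verdicts):
--         return "REQUIRES_HUMAN_REVIEW"
--
--     # If all are SAFE, session is SAFE
--     if all(v == "SAFE" for v in verdicts):
--         return "SAFE"
--
--     # Mixed verdicts or defects found → requires review
--     if total_defects > 0:
--         return "REQUIRES_HUMAN_REVIEW"
--
--     # Default to review for safety
--     return "REQUIRES_HUMAN_REVIEW"
-- ===== SOURCE B (Python) =====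
-- _SEVERITY = {"UNSAFE": 3, "REQUIRES_HUMAN_REVIEW": 2, "SAFE": 0}
-- _VERDICT_BY_SEVERITY = {3: "UNSAFE", 2: "REQUIRES_HUMAN_REVIEW", 0: "SAFE"}
--
-- def determine_aggregate_verdict(verdicts, total_defects):
--     # Severity-lattice formulation: one pass taking the max severity.
--     # Unknown verdict strings get severity 1, which decodes to review.
--     if not verdicts:
--         return "UNKNOWN"
--     worst = max(_SEVERITY.get(v, 1) for v in verdicts)
--     return _VERDICT_BY_SEVERITY.get(worst, "REQUIRES_HUMAN_REVIEW")
-- ===== Notes on version B (the rewrite author's own statement) =====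
-- stated objective: simpler
-- what changed: Replaces the three separate any/any/all scans with a single pass that folds each verdict to a numeric severity (UNSAFE=3, REVIEW=2, other=1, SAFE=0), takes the max, and decodes it back to a verdict string.
import Mathlib
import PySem

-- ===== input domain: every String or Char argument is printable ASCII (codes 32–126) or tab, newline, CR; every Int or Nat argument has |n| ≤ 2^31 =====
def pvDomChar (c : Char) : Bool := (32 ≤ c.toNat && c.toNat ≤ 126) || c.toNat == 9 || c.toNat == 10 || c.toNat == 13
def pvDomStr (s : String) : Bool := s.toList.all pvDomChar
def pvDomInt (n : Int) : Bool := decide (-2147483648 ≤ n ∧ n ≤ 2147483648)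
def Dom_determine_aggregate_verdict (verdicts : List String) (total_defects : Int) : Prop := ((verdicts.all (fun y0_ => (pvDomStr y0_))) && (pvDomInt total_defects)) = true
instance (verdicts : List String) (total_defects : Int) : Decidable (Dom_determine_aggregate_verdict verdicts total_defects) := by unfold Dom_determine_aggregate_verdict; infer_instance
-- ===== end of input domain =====

-- B replaces A's three any/any/all scans by a single max-severity fold (simpler, one pass).


-- ===== PORT A =====
def determine_aggregate_verdict (verdicts : List String) (total_defects : Int) : String :=
  if verdicts = [] then "UNKNOWN"
  else if verdicts.any (fun v => v == "UNSAFE") then "UNSAFE"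
  else if verdicts.any (fun v => v == "REQUIRES_HUMAN_REVIEW") then "REQUIRES_HUMAN_REVIEW"
  else if verdicts.all (fun v => v == "SAFE") then "SAFE"
  else if total_defects > 0 then "REQUIRES_HUMAN_REVIEW"
  else "REQUIRES_HUMAN_REVIEW"

-- ===== PORT B =====
-- _SEVERITY.get(v, 1): first-match lookup in the 3-entry literal dict, ported as the equivalent chain (exact)
def pvSev (v : String) : Int :=
  if v == "UNSAFE" then 3
  else if v == "REQUIRES_HUMAN_REVIEW" then 2
  else if v == "SAFE" then 0
  else 1

-- _VERDICT_BY_SEVERITY.get(worst, "REQUIRES_HUMAN_REVIEW"), ported the same way (exact)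
def pvDecode (m : Int) : String :=
  if m == 3 then "UNSAFE"
  else if m == 2 then "REQUIRES_HUMAN_REVIEW"
  else if m == 0 then "SAFE"
  else "REQUIRES_HUMAN_REVIEW"

def determine_aggregate_verdict_alt (verdicts : List String) (total_defects : Int) : String :=
  match verdicts with
  | [] => "UNKNOWN"
  | h :: t => pvDecode (t.foldl (fun acc v => max acc (pvSev v)) (pvSev h))

-- ===== PRECONDITION & SPEC =====
def Spec_determine_aggregate_verdict (verdicts : List String) (total_defects : Int) (out : String) : Prop := out = determine_aggregate_verdict_alt verdicts total_defects
instance (verdicts : List String) (total_defects : Int) (out : String) : Decidable (Spec_determine_aggregate_verdict verdicts total_defects out) := by unfold Spec_determine_aggregate_verdict; infer_instance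

-- ===== CLAIM (what is proved, stated in full; the proofs are below) =====
def Claim_equal_determine_aggregate_verdict : Prop := ∀ (verdicts : List String) (total_defects : Int), Dom_determine_aggregate_verdict verdicts total_defects → Spec_determine_aggregate_verdict verdicts total_defects (determine_aggregate_verdict verdicts total_defects)

-- ===== LEMMAS AND PROOFS =====

lemma pvSev_mem (v : String) : pvSev v = 0 ∨ pvSev v = 1 ∨ pvSev v = 2 ∨ pvSev v = 3 := by
  unfold pvSev; split_ifs <;> simp

lemma fold_sev (l : List String) (a : Int) (ha : a = 0 ∨ a = 1 ∨ a = 2 ∨ a = 3) :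
    l.foldl (fun acc v => max acc (pvSev v)) a =
      if l.any (fun v => v == "UNSAFE") then 3
      else if l.any (fun v => v == "REQUIRES_HUMAN_REVIEW") then max a 2
      else if l.all (fun v => v == "SAFE") then a
      else max a 1 := by
  induction l generalizing a with
  | nil => simp
  | cons h t ih =>
    have hh := pvSev_mem h
    have ih' := ih (max a (pvSev h)) (by omega)
    simp only [List.foldl_cons, List.any_cons, List.all_cons, ih']
    by_cases h1 : h = "UNSAFE"
    · simp [h1, pvSev]
      all_goals omega
    · by_cases h2 : h = "REQUIRES_HUMAN_REVIEW"
      · simp [h2, pvSev]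
      · by_cases h3 : h = "SAFE"
        · simp [h3, pvSev]
          all_goals split_ifs <;> omega
        · have hs : pvSev h = 1 := by simp [pvSev, h1, h2, h3]
          simp [h1, h2, h3, hs]
          all_goals split_ifs <;> omega

-- ===== VERDICT (by name: the statement is the Claim_ definition above) =====
theorem determine_aggregate_verdict_spec : Claim_equal_determine_aggregate_verdict := by
  intro verdicts total_defects _
  unfold Spec_determine_aggregate_verdict
  cases verdicts with
  | nil => rfl
  | cons h t =>
    have hh := pvSev_mem h
    have halt : determine_aggregate_verdict_alt (h :: t) total_defects =
        pvDecode (t.foldl (fun acc v => max acc (pvSev v)) (pvSev h)) := rfl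
    rw [halt, fold_sev t (pvSev h) hh]
    unfold determine_aggregate_verdict
    clear hh halt
    by_cases h1 : h = "UNSAFE"
    · simp [h1, pvSev, pvDecode]
    · by_cases h2 : h = "REQUIRES_HUMAN_REVIEW"
      · simp [h2, pvSev, pvDecode]
        all_goals split_ifs <;> rfl
      · by_cases h3 : h = "SAFE"
        · simp [h3, pvSev, pvDecode]
          all_goals split_ifs <;> first | rfl | omega | simp_all
        · have hs : pvSev h = 1 := by simp [pvSev, h1, h2, h3]
          simp [h1, h2, h3, hs, pvDecode]
          all_goals split_ifs <;> first | rfl | omega | simp_all
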